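-- pv_equiv track=rewrite | github.com/meyer-hilfiger/Dual-Attack-3.0 | doubleRLPN/curve/make.py | inverse_sum_partial
-- ===== SOURCE A (Python) =====
-- def inverse_sum_partial(L):
-- 	t = 0
-- 	tmp = 0
-- 	for i in range(len(L)-1, -1, -1) :
-- 		tmp = L[i]
-- 		L[i] += t
-- 		t += tmp
-- 		tmp = 0
-- 	return L
-- ===== SOURCE B (Python) =====
-- def inverse_sum_partial(L):
--     total = sum(L)
--     out = []
--     for x in L:
--         out.append(total)
--         total -= x
--     L[:] = out
--     return L
-- ===== Notes on version B (the rewrite author's own statement) =====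
-- stated objective: alternative
-- what changed: Replaces A's backward in-place accumulator loop with a forward pass that starts from sum(L) and emits the running total while subtracting each element, building a fresh list that is then slice-assigned back.
import Mathlib
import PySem

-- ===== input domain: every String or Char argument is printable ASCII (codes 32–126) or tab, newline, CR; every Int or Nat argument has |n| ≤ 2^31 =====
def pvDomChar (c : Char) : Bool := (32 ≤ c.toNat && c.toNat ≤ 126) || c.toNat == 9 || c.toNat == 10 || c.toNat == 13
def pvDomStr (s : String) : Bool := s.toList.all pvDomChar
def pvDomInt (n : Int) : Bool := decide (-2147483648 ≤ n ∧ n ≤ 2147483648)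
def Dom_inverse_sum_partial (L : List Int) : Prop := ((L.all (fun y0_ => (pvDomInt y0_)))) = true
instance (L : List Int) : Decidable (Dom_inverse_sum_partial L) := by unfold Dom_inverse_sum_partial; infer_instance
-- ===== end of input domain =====

-- B replaces A's backward in-place accumulator loop with a forward pass from sum(L); both Pythons
-- mutate L in place, the equivalence proved here is about the RETURN value.

-- ===== PORT A =====
-- A: t = 0; for i in range(len(L)-1, -1, -1): tmp = L[i]; L[i] += t; t += tmp;  return L
def inverse_sum_partial (L : List Int) : List Int :=
  ((PySem.List.pyRange ((L.length : Int) - 1) (-1) (-1)).foldl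
    (fun (st : Int × List Int) (i : Int) =>
      let tmp := PySem.List.pyGetD st.2 i 0
      (st.1 + tmp, PySem.List.pySetD st.2 i (tmp + st.1)))
    (0, L)).2

-- ===== PORT B =====
-- B: total = sum(L); out = []; for x in L: out.append(total); total -= x;  L[:] = out; return L
def inverse_sum_partial_alt (L : List Int) : List Int :=
  ((L.foldl
    (fun (st : Int × List Int) (x : Int) => (st.1 - x, st.2 ++ [st.1]))
    (L.sum, ([] : List Int)))).2

-- ===== PRECONDITION & SPEC =====
def Spec_inverse_sum_partial (L : List Int) (out : List Int) : Prop := out = inverse_sum_partial_alt L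
instance (L : List Int) (out : List Int) : Decidable (Spec_inverse_sum_partial L out) := by unfold Spec_inverse_sum_partial; infer_instance

-- ===== CLAIM (what is proved, stated in full; the proofs are below) =====
def Claim_equal_inverse_sum_partial : Prop := ∀ (L : List Int), Dom_inverse_sum_partial L → Spec_inverse_sum_partial L (inverse_sum_partial L)

-- ===== LEMMAS AND PROOFS =====

/-- Suffix sums shifted by `t`: element `i` is `L[i] + (sum L[i+1:]) + t`. -/
def sfxT : List Int → Int → List Int
  | [], _ => []
  | x :: xs, t => (x + (xs.sum + t)) :: sfxT xs t

theorem sfxT_append_singleton (F : List Int) (x t : Int) :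
    sfxT (F ++ [x]) t = sfxT F (x + t) ++ [x + t] := by
  induction F with
  | nil => simp [sfxT]
  | cons y F ih =>
      simp only [List.cons_append, sfxT, ih, List.sum_append, List.sum_cons, List.sum_nil]
      congr 1
      ring

theorem loopA (front back : List Int) (t : Int) :
    ((PySem.List.pyRange ((front.length : Int) - 1) (-1) (-1)).foldl
      (fun (st : Int × List Int) (i : Int) =>
        (st.1 + PySem.List.pyGetD st.2 i 0,
         PySem.List.pySetD st.2 i (PySem.List.pyGetD st.2 i 0 + st.1)))
      (t, front ++ back))
    = (t + front.sum, sfxT front t ++ back) := by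
  induction front using List.reverseRecOn generalizing back t with
  | nil =>
      rw [PySem.List.pyRange_neg_one_eq_nil (by norm_num)]
      simp [sfxT]
  | append_singleton F x ih =>
      have hlen : ((F ++ [x]).length : Int) - 1 = (F.length : Int) := by
        simp
      rw [hlen, PySem.List.pyRange_neg_one_cons (by omega)]
      simp only [List.foldl_cons]
      have hget : PySem.List.pyGetD (F ++ [x] ++ back) ((F.length : Int)) 0 = x := by
        rw [PySem.List.pyGetD_natCast]
        simp [List.getD]
      have hset : PySem.List.pySetD (F ++ [x] ++ back) ((F.length : Int)) (x + t)
          = F ++ (x + t) :: back := by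
        rw [PySem.List.pySetD_natCast]
        rw [List.append_assoc, List.set_append_right _ _ (le_refl _)]
        simp
      rw [hget, hset]
      rw [ih ((x + t) :: back) (t + x)]
      rw [sfxT_append_singleton]
      have h1 : t + x = x + t := by ring
      rw [h1]
      simp only [List.sum_append, List.sum_cons, List.sum_nil, Prod.mk.injEq]
      exact ⟨by ring, by simp⟩

theorem portA_eq_sfxT (L : List Int) : inverse_sum_partial L = sfxT L 0 := by
  have h := loopA L [] 0
  simp only [List.append_nil] at h
  show (List.foldl
      (fun (st : Int × List Int) (i : Int) =>
        (st.1 + PySem.List.pyGetD st.2 i 0,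
         PySem.List.pySetD st.2 i (PySem.List.pyGetD st.2 i 0 + st.1)))
      (0, L) (PySem.List.pyRange ((L.length : Int) - 1) (-1) (-1))).2 = sfxT L 0
  rw [h]

theorem loopB (L : List Int) (t : Int) (acc : List Int) :
    (L.foldl (fun (st : Int × List Int) (x : Int) => (st.1 - x, st.2 ++ [st.1])) (t, acc))
    = (t - L.sum, acc ++ sfxT L (t - L.sum)) := by
  induction L generalizing t acc with
  | nil => simp [sfxT]
  | cons x xs ih =>
      simp only [List.foldl_cons]
      rw [ih]
      have h1 : t - x - xs.sum = t - (x + xs.sum) := by ring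
      rw [h1]
      simp only [List.sum_cons, sfxT, Prod.mk.injEq]
      refine ⟨trivial, ?_⟩
      have h2 : x + (xs.sum + (t - (x + xs.sum))) = t := by ring
      rw [h2]
      simp

theorem portB_eq_sfxT (L : List Int) : inverse_sum_partial_alt L = sfxT L 0 := by
  unfold inverse_sum_partial_alt
  rw [loopB]
  simp

-- ===== VERDICT (by name: the statement is the Claim_ definition above) =====
theorem inverse_sum_partial_spec : Claim_equal_inverse_sum_partial := by
  intro L _
  unfold Spec_inverse_sum_partial
  rw [portA_eq_sfxT, portB_eq_sfxT]
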